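-- pv_equiv track=rewrite | github.com/zhengjiani/pyAlgorithm | interview/interview18.py | func
-- ===== SOURCE A (Python) =====
-- def func(s):
--     if len(s) == 0 or len(s) == 1:
--         return (s, len(s))
--     result = [1] * len(s)
--     for left in range(len(s) - 1):
--         for right in range(left + 1, len(s)):
--             if s[left] == s[right]:
--                 result[left] += 1
--             else:
--                 break
--     dic = {}
--     dic[s[result.index(max(result))]]=max(result)
--     s = s[result.index(max(result)):len(s)-1]
--     return func(s)
-- ===== SOURCE B (Python) =====
-- def func(s):
--     # Iterative: repeatedly find the start of the leftmost longest run of equal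
--     # characters with one linear scan, then drop the prefix before it and the
--     # last character, until at most one character remains.
--     while len(s) > 1:
--         n = len(s)
--         best_len = 0
--         best_start = 0
--         i = 0
--         while i < n:
--             j = i
--             while j < n and s[j] == s[i]:
--                 j += 1
--             if best_len < j - i:
--                 best_len = j - i
--                 best_start = i
--             i = j
--         s = s[best_start:n - 1]
--     return (s, len(s))
-- ===== Notes on version B (the rewrite author's own statement) =====
-- stated objective: faster
-- what changed: Each trimming step now finds the leftmost longest run with one linear scan carrying a (best_len, best_start) accumulator instead of A's nested per-position comparison loops followed by max() and list.index() passes, and the outer recursion becomes a while loop.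
import Mathlib
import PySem

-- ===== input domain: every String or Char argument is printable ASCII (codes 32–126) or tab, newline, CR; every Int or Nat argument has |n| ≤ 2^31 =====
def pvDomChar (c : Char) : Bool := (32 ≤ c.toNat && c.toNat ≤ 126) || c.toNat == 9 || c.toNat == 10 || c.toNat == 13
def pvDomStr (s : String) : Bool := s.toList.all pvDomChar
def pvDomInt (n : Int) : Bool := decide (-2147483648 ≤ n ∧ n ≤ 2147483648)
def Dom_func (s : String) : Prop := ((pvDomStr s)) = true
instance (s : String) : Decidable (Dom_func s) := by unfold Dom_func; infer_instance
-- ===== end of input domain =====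

-- B replaces A's nested per-position comparison loops plus max()/index() passes by one
-- linear scan per trimming step that tracks the leftmost longest run directly, and the
-- outer recursion by a loop (objective: faster). Both ports work on s.toList (the PySem
-- string primitives are thin wrappers over List Char); every loop is transcribed as
-- fuel-based structural recursion with visibly sufficient fuel (a totality device only).

-- ===== PORT A =====
-- inner loop: 'for right in range(left+1, len(s)): if s[left]==s[right]: result[left]+=1 else: break'
def innerA (cs : List Char) (c : Char) (fuel right : Nat) (acc : Int) : Int :=
  match fuel with
  | 0 => acc
  | fuel + 1 =>
    if h : right < cs.length then
      if cs[right] == c then innerA cs c fuel (right + 1) (acc + 1) else acc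
    else acc

-- 'result = [1] * len(s)' followed by the outer loop over left in range(len(s)-1);
-- each entry is updated independently, so result[left] is the inner loop's count
-- (s[left] is in range, so cs.getD left ' ' is exact)
def resultA (cs : List Char) : List Int :=
  (List.range cs.length).map (fun left =>
    if left < cs.length - 1 then innerA cs (cs.getD left ' ') cs.length (left + 1) 1 else 1)

-- the local dict 'dic' in A is built and immediately discarded (dead code whose index is
-- in range, so it cannot raise) and is not materialised
def funcA (fuel : Nat) (cs : List Char) : List Char × Int :=
  match fuel with
  | 0 => (cs, (cs.length : Int))
  | fuel + 1 =>
    if cs.length = 0 ∨ cs.length = 1 then (cs, (cs.length : Int))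
    else
      let r := resultA cs
      let m := (PySem.List.max? r (fun x => x)).getD 0   -- max(result); r is nonempty here
      let idx := (PySem.List.index? r m).getD 0          -- result.index(max(result)); m ∈ r here
      funcA fuel (PySem.List.slice cs (some (idx : Int)) (some ((cs.length : Int) - 1)))

def func (s : String) : String × Int :=
  (String.ofList (funcA (s.toList.length + 1) s.toList).1, (funcA (s.toList.length + 1) s.toList).2)

-- ===== PORT B =====
-- inner 'while j < n and s[j] == s[i]: j += 1'  (c = s[i]; j starts at i)
def runEnd (cs : List Char) (c : Char) (fuel j : Nat) : Nat :=
  match fuel with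
  | 0 => j
  | fuel + 1 =>
    if h : j < cs.length then
      if cs[j] == c then runEnd cs c fuel (j + 1) else j
    else j

-- the middle 'while i < n' scan: i walks the run starts, (bl, bs) = (best_len, best_start)
def bestScan (cs : List Char) (fuel i bl bs : Nat) : Nat × Nat :=
  match fuel with
  | 0 => (bl, bs)
  | fuel + 1 =>
    if h : i < cs.length then
      let j := runEnd cs cs[i] cs.length i
      if bl < j - i then bestScan cs fuel j (j - i) i else bestScan cs fuel j bl bs
    else (bl, bs)

-- 'while len(s) > 1: … s = s[best_start:n-1]' as tail recursion
def funcB (fuel : Nat) (cs : List Char) : List Char × Int :=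
  match fuel with
  | 0 => (cs, (cs.length : Int))
  | fuel + 1 =>
    if 1 < cs.length then
      funcB fuel (PySem.List.slice cs (some (((bestScan cs (cs.length + 1) 0 0 0).2 : Nat) : Int))
        (some ((cs.length : Int) - 1)))
    else (cs, (cs.length : Int))

def func_alt (s : String) : String × Int :=
  (String.ofList (funcB (s.toList.length + 1) s.toList).1, (funcB (s.toList.length + 1) s.toList).2)

-- ===== PRECONDITION & SPEC =====
def Spec_func (s : String) (out : String × Int) : Prop := out = func_alt s
instance (s : String) (out : String × Int) : Decidable (Spec_func s out) := by unfold Spec_func; infer_instance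

-- ===== CLAIM (what is proved, stated in full; the proofs are below) =====
def Claim_equal_func : Prop := ∀ (s : String), Dom_func s → Spec_func s (func s)

-- ===== LEMMAS AND PROOFS =====

-- run length starting at position i: the quantity both programs compare across positions
def RL (cs : List Char) (i : Nat) : Nat := runEnd cs (cs.getD i ' ') cs.length i - i

theorem le_runEnd (cs : List Char) (c : Char) (fuel j : Nat) : j ≤ runEnd cs c fuel j := by
  fun_induction runEnd cs c fuel j with
  | case1 j => omega
  | case2 j fuel h hc ih => omega
  | case3 j fuel h hc => omega
  | case4 j fuel h => omega

theorem runEnd_le (cs : List Char) (c : Char) (fuel j : Nat) (hj : j ≤ cs.length) :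
    runEnd cs c fuel j ≤ cs.length := by
  fun_induction runEnd cs c fuel j with
  | case1 j => omega
  | case2 j fuel h hc ih => exact ih (by omega)
  | case3 j fuel h hc => omega
  | case4 j fuel h => omega

theorem runEnd_step (cs : List Char) (c : Char) (fuel j : Nat) (h : j < cs.length)
    (hc : cs[j] == c) : runEnd cs c (fuel + 1) j = runEnd cs c fuel (j + 1) := by
  rw [runEnd]; simp [h, hc]

theorem runEnd_stop (cs : List Char) (c : Char) (fuel j : Nat)
    (h : ¬(j < cs.length) ∨ ∃ (hj : j < cs.length), ¬(cs[j] == c)) :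
    runEnd cs c fuel j = j := by
  match fuel with
  | 0 => rfl
  | fuel + 1 =>
    rw [runEnd]
    rcases h with h | ⟨hj, hc⟩
    · simp [h]
    · simp [hj, hc]

-- with sufficient fuel the scan's result does not depend on the fuel
theorem runEnd_fuel_congr (cs : List Char) (c : Char) (f1 f2 j : Nat)
    (h1 : cs.length ≤ f1 + j) (h2 : cs.length ≤ f2 + j) :
    runEnd cs c f1 j = runEnd cs c f2 j := by
  induction f1 generalizing f2 j with
  | zero =>
      rw [runEnd_stop cs c 0 j (Or.inl (by omega)),
          runEnd_stop cs c f2 j (Or.inl (by omega))]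
  | succ f1 ih =>
      by_cases hj : j < cs.length
      · by_cases hc : (cs[j] == c) = true
        · obtain ⟨f2', rfl⟩ : ∃ f2', f2 = f2' + 1 := ⟨f2 - 1, by omega⟩
          rw [runEnd_step cs c f1 j hj hc, runEnd_step cs c f2' j hj hc]
          exact ih f2' (j + 1) (by omega) (by omega)
        · rw [runEnd_stop cs c _ j (Or.inr ⟨hj, hc⟩),
              runEnd_stop cs c f2 j (Or.inr ⟨hj, hc⟩)]
      · rw [runEnd_stop cs c _ j (Or.inl hj), runEnd_stop cs c f2 j (Or.inl hj)]

-- every position strictly inside the run holds the run's character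
theorem run_all_eq (cs : List Char) (c : Char) (fuel j : Nat) :
    ∀ k, j ≤ k → k < runEnd cs c fuel j → cs.getD k ' ' = c := by
  fun_induction runEnd cs c fuel j with
  | case1 j => intro k hk1 hk2; omega
  | case2 j fuel h hc ih =>
      intro k hk1 hk2
      rcases Nat.eq_or_lt_of_le hk1 with rfl | hlt
      · simp [List.getD_eq_getElem?_getD, List.getElem?_eq_getElem h]
        exact eq_of_beq hc
      · exact ih k hlt hk2
  | case3 j fuel h hc => intro k hk1 hk2; omega
  | case4 j fuel h => intro k hk1 hk2; omega

-- starting anywhere inside the run (with canonical fuel) reaches the same end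
theorem runEnd_idem (cs : List Char) (c : Char) (fuel j : Nat) (hf : cs.length ≤ fuel + j) :
    ∀ k, j ≤ k → k ≤ runEnd cs c fuel j → runEnd cs c cs.length k = runEnd cs c fuel j := by
  induction fuel generalizing j with
  | zero =>
      intro k hk1 hk2
      rw [runEnd_stop cs c 0 j (Or.inl (by omega))] at hk2 ⊢
      have hkj : k = j := by omega
      subst hkj
      exact runEnd_stop cs c cs.length k (Or.inl (by omega))
  | succ fuel ih =>
      intro k hk1 hk2
      by_cases hj : j < cs.length
      · by_cases hc : (cs[j] == c) = true
        · rw [runEnd_step cs c fuel j hj hc] at hk2 ⊢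
          rcases Nat.eq_or_lt_of_le hk1 with rfl | hlt
          · have hn : cs.length = (cs.length - 1) + 1 := by omega
            rw [hn, runEnd_step cs c (cs.length - 1) j hj hc]
            exact runEnd_fuel_congr cs c (cs.length - 1) fuel (j + 1) (by omega) (by omega)
          · exact ih (j + 1) (by omega) k hlt hk2
        · rw [runEnd_stop cs c _ j (Or.inr ⟨hj, hc⟩)] at hk2 ⊢
          have hkj : k = j := by omega
          subst hkj
          exact runEnd_stop cs c cs.length k (Or.inr ⟨hj, hc⟩)
      · rw [runEnd_stop cs c _ j (Or.inl hj)] at hk2 ⊢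
        have hkj : k = j := by omega
        subst hkj
        exact runEnd_stop cs c cs.length k (Or.inl hj)

-- A's inner loop counts exactly up to the run end (same fuel on both sides)
theorem innerA_eq (cs : List Char) (c : Char) (fuel j : Nat) (acc : Int) :
    innerA cs c fuel j acc = acc + ((runEnd cs c fuel j : Int) - (j : Int)) := by
  fun_induction innerA cs c fuel j acc with
  | case1 j acc =>
      have h0 : runEnd cs c 0 j = j := rfl
      rw [h0]; omega
  | case2 j acc fuel h hc ih =>
      rw [runEnd_step cs c fuel j h hc, ih]
      have := le_runEnd cs c fuel (j + 1)
      push_cast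
      omega
  | case3 j acc fuel h hc =>
      rw [runEnd_stop cs c _ j (Or.inr ⟨h, hc⟩)]
      omega
  | case4 j acc fuel h =>
      rw [runEnd_stop cs c _ j (Or.inl h)]
      omega

theorem runEnd_start (cs : List Char) (i : Nat) (h : i < cs.length) :
    runEnd cs (cs.getD i ' ') cs.length i = runEnd cs (cs.getD i ' ') (cs.length - 1) (i + 1) := by
  have hn : cs.length = (cs.length - 1) + 1 := by omega
  have hc : (cs[i] == cs.getD i ' ') = true := by
    simp [List.getD_eq_getElem?_getD, List.getElem?_eq_getElem h]
  conv_lhs => rw [hn]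
  exact runEnd_step cs _ (cs.length - 1) i h hc

theorem RL_pos (cs : List Char) (i : Nat) (h : i < cs.length) : 1 ≤ RL cs i := by
  unfold RL
  rw [runEnd_start cs i h]
  have := le_runEnd cs (cs.getD i ' ') (cs.length - 1) (i + 1)
  omega

theorem length_resultA (cs : List Char) : (resultA cs).length = cs.length := by
  simp [resultA]

theorem resultA_get (cs : List Char) (i : Nat) (h : i < cs.length) :
    (resultA cs)[i]'(by rw [length_resultA]; exact h) = (RL cs i : Int) := by
  unfold resultA RL
  simp only [List.getElem_map, List.getElem_range]
  by_cases hi : i < cs.length - 1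
  · simp only [hi, if_true]
    rw [innerA_eq]
    have hcg : runEnd cs (cs.getD i ' ') cs.length (i + 1)
        = runEnd cs (cs.getD i ' ') (cs.length - 1) (i + 1) :=
      runEnd_fuel_congr cs _ cs.length (cs.length - 1) (i + 1) (by omega) (by omega)
    rw [hcg, ← runEnd_start cs i h]
    have h1 := le_runEnd cs (cs.getD i ' ') cs.length i
    have h2 : 1 ≤ RL cs i := RL_pos cs i h
    unfold RL at h2
    push_cast
    omega
  · simp only [hi, if_false]
    rw [runEnd_start cs i h]
    rw [runEnd_stop cs _ (cs.length - 1) (i + 1) (Or.inl (by omega))]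
    omega

-- inside a maximal run the remaining run length decreases strictly towards the end
theorem RL_in_run (cs : List Char) (i : Nat) (h : i < cs.length) :
    ∀ k, i ≤ k → k < runEnd cs (cs.getD i ' ') cs.length i →
      RL cs k = runEnd cs (cs.getD i ' ') cs.length i - k := by
  intro k hk1 hk2
  have hc : cs.getD k ' ' = cs.getD i ' ' := run_all_eq cs _ cs.length i k hk1 hk2
  unfold RL
  rw [hc, runEnd_idem cs (cs.getD i ' ') cs.length i (by omega) k hk1 (by omega)]

theorem getElem_getD (cs : List Char) (i : Nat) (h : i < cs.length) :
    cs[i] = cs.getD i ' ' := by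
  simp [List.getD_eq_getElem?_getD, List.getElem?_eq_getElem h]

-- loop invariant of B's scan: bl is the running max of RL over the scanned prefix and
-- bs the first index attaining it (fuel is sufficient: the scan reaches the end)
theorem bestScan_spec (cs : List Char) (fuel g bl bs : Nat) (hfuel : cs.length ≤ fuel + g)
    (hgle : g ≤ cs.length)
    (h1 : ∀ k, k < g → RL cs k ≤ bl)
    (h2 : ∀ k, k < bs → RL cs k < bl)
    (h3 : 0 < bl → bs < g ∧ RL cs bs = bl)
    (h4 : bl = 0 → bs = 0) :
    (∀ k, k < cs.length → RL cs k ≤ (bestScan cs fuel g bl bs).1) ∧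
    (∀ k, k < (bestScan cs fuel g bl bs).2 → RL cs k < (bestScan cs fuel g bl bs).1) ∧
    (0 < (bestScan cs fuel g bl bs).1 →
      (bestScan cs fuel g bl bs).2 < cs.length ∧
        RL cs (bestScan cs fuel g bl bs).2 = (bestScan cs fuel g bl bs).1) ∧
    ((bestScan cs fuel g bl bs).1 = 0 → (bestScan cs fuel g bl bs).2 = 0) := by
  induction fuel generalizing g bl bs with
  | zero =>
      rw [show bestScan cs 0 g bl bs = (bl, bs) from rfl]
      refine ⟨?_, h2, ?_, h4⟩
      · intro k hk; exact h1 k (by omega)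
      · intro h0
        obtain ⟨a, b⟩ := h3 h0
        exact ⟨by omega, b⟩
  | succ fuel ih =>
      by_cases hg : g < cs.length
      · have hstep : bestScan cs (fuel + 1) g bl bs =
            (if bl < runEnd cs cs[g] cs.length g - g
             then bestScan cs fuel (runEnd cs cs[g] cs.length g) (runEnd cs cs[g] cs.length g - g) g
             else bestScan cs fuel (runEnd cs cs[g] cs.length g) bl bs) := by
          rw [bestScan]; simp [hg]
        have hgj : g < runEnd cs cs[g] cs.length g := by
          rw [getElem_getD cs g hg]
          have h5 := RL_pos cs g hg
          unfold RL at h5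
          have h6 := le_runEnd cs (cs.getD g ' ') cs.length g
          omega
        have hjn : runEnd cs cs[g] cs.length g ≤ cs.length :=
          runEnd_le cs _ cs.length g (by omega)
        have hRLg : RL cs g = runEnd cs cs[g] cs.length g - g := by
          unfold RL; rw [← getElem_getD cs g hg]
        have hin : ∀ k, g ≤ k → k < runEnd cs cs[g] cs.length g →
            RL cs k = runEnd cs cs[g] cs.length g - k := by
          intro k hk1 hk2
          rw [getElem_getD cs g hg] at hk2 ⊢
          exact RL_in_run cs g hg k hk1 hk2
        rw [hstep]
        by_cases hlt : bl < runEnd cs cs[g] cs.length g - g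
        · simp only [hlt, if_true]
          apply ih (runEnd cs cs[g] cs.length g) (runEnd cs cs[g] cs.length g - g) g
            (by omega) (by omega)
          · intro k hk
            by_cases hkg : k < g
            · have := h1 k hkg; omega
            · have := hin k (by omega) hk; omega
          · intro k hk
            have := h1 k hk; omega
          · intro _; exact ⟨hgj, hRLg⟩
          · intro h0; omega
        · simp only [hlt, if_false]
          apply ih (runEnd cs cs[g] cs.length g) bl bs (by omega) (by omega)
          · intro k hk
            by_cases hkg : k < g
            · exact h1 k hkg
            · have := hin k (by omega) hk; omega
          · exact h2
          · intro h0
            obtain ⟨a, b⟩ := h3 h0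
            exact ⟨by omega, b⟩
          · exact h4
      · have hstep : bestScan cs (fuel + 1) g bl bs = (bl, bs) := by
          rw [bestScan]; simp [hg]
        rw [hstep]
        refine ⟨?_, h2, ?_, h4⟩
        · intro k hk; exact h1 k (by omega)
        · intro h0
          obtain ⟨a, b⟩ := h3 h0
          exact ⟨by omega, b⟩

-- the index A extracts with max()/index() is exactly the start B's scan tracks
theorem idx_eq (cs : List Char) (hn : 2 ≤ cs.length) :
    ((PySem.List.index? (resultA cs)
        ((PySem.List.max? (resultA cs) (fun x => x)).getD 0)).getD 0 : Nat)
      = (bestScan cs (cs.length + 1) 0 0 0).2 := by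
  have hlen := length_resultA cs
  have hne : resultA cs ≠ [] := by
    intro hcon; rw [hcon] at hlen; simp at hlen; omega
  obtain ⟨m, hm⟩ : ∃ m, PySem.List.max? (resultA cs) (fun x => x) = some m := by
    cases hmax : PySem.List.max? (resultA cs) (fun x => x) with
    | none => exact absurd ((PySem.List.max?_eq_none_iff _ _).mp hmax) hne
    | some m => exact ⟨m, rfl⟩
  have hmmem : m ∈ resultA cs := PySem.List.max?_mem hm
  have hmax : ∀ y ∈ resultA cs, y ≤ m := by
    intro y hy; exact PySem.List.max?_isMax hm y hy
  obtain ⟨idx, hidx⟩ : ∃ k, PySem.List.index? (resultA cs) m = some k := by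
    cases hix : PySem.List.index? (resultA cs) m with
    | none => exact absurd ((PySem.List.index?_isSome_iff _ _).mpr hmmem) (by rw [hix]; simp)
    | some k => exact ⟨k, rfl⟩
  obtain ⟨hik, hival, hifirst⟩ := PySem.List.getElem_of_index?_eq_some hidx
  rw [hm]
  simp only [Option.getD_some]
  rw [hidx]
  simp only [Option.getD_some]
  rw [hlen] at hik
  have hival' : (RL cs idx : Int) = m := by rw [← resultA_get cs idx hik]; exact hival
  have hmax' : ∀ k, k < cs.length → (RL cs k : Int) ≤ m := by
    intro k hk
    have hmem : (resultA cs)[k]'(by omega) ∈ resultA cs := List.getElem_mem _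
    have := hmax _ hmem
    rwa [resultA_get cs k hk] at this
  have hfirst' : ∀ k, k < idx → (RL cs k : Int) < m := by
    intro k hk
    have hkn : k < cs.length := by omega
    have ha := hmax' k hkn
    have hb : (resultA cs)[k]'(by omega) ≠ m := hifirst k (by omega)
    rw [resultA_get cs k hkn] at hb
    omega
  obtain ⟨b1, b2, b3, b4⟩ := bestScan_spec cs (cs.length + 1) 0 0 0 (by omega) (by omega)
    (by intro k hk; omega) (by intro k hk; omega) (by intro h0; omega) (by intro _; rfl)
  have hp1pos : 0 < (bestScan cs (cs.length + 1) 0 0 0).1 := by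
    have := b1 0 (by omega)
    have := RL_pos cs 0 (by omega)
    omega
  obtain ⟨hbslt, hbsval⟩ := b3 hp1pos
  have hmeq : ((bestScan cs (cs.length + 1) 0 0 0).1 : Int) = m := by
    have ha := hmax' _ hbslt
    rw [hbsval] at ha
    have hb := b1 idx hik
    omega
  rcases Nat.lt_trichotomy idx (bestScan cs (cs.length + 1) 0 0 0).2 with hlt | heq | hgt
  · have := b2 idx hlt
    omega
  · exact heq
  · have := hfirst' _ hgt
    rw [hbsval] at this
    omega

-- the two ports agree step by step (same fuel on both sides)
theorem funcA_eq_funcB (fuel : Nat) (cs : List Char) : funcA fuel cs = funcB fuel cs := by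
  induction fuel generalizing cs with
  | zero => rfl
  | succ fuel ih =>
      by_cases hsmall : cs.length = 0 ∨ cs.length = 1
      · rw [funcA, funcB]
        simp only [hsmall, if_true]
        have : ¬ (1 < cs.length) := by omega
        simp [this]
      · have hn : 2 ≤ cs.length := by omega
        rw [funcA, funcB]
        simp only [hsmall, if_false, show 1 < cs.length by omega, if_true]
        rw [idx_eq cs hn]
        exact ih _

-- ===== VERDICT (by name: the statement is the Claim_ definition above) =====
theorem func_spec : Claim_equal_func := by
  intro s _
  unfold Spec_func func func_alt
  rw [funcA_eq_funcB]
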